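-- pv_equiv track=rewrite | github.com/udonehn/Algorithm | 백준/Gold/3973. Time To Live/Time To Live.py | DFS
-- ===== SOURCE A (Python) =====
-- def DFS(start, tree):
--     stack = [(start, 0)]
--     visited = [False] * 100001
--     visited[start] = True
--
--     answer = 0
--     while stack:
--         p, length = stack.pop()
--         count = 0
--         for i in tree[p]:
--             node = i
--             if not visited[node]:
--                 count += 1
--                 visited[node] = True
--                 stack.append((node, length+1))
--         if count == 0:
--             answer = max(answer, length)
--     return answer
-- ===== SOURCE B (Python) =====
-- def DFS(start, tree):
--     # Recursive DFS with a visited set: descend into freshly discovered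
--     # children in reverse adjacency order (mirroring LIFO processing),
--     # recording the depth of every dead end (a node discovering nothing new).
--     visited = {start}
--     best = 0
--
--     def dfs(p, length):
--         nonlocal best
--         fresh = []
--         for c in tree[p]:
--             if c not in visited:
--                 visited.add(c)
--                 fresh.append(c)
--         if not fresh:
--             best = max(best, length)
--         for c in reversed(fresh):
--             dfs(c, length + 1)
--
--     dfs(start, 0)
--     return best
-- ===== Notes on version B (the rewrite author's own statement) =====
-- stated objective: alternative
-- what changed: Replaces the explicit (node,length) stack with mark-on-push over a fixed 100001-slot boolean array by a recursive DFS helper over a visited set that descends into freshly discovered children in reverse adjacency order and updates the answer at dead ends.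
-- outside the precondition, e.g. on DFS(0, {0: [100000], 100000: [-1], -1: []}): A returns 1, B returns 2
import Mathlib
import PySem

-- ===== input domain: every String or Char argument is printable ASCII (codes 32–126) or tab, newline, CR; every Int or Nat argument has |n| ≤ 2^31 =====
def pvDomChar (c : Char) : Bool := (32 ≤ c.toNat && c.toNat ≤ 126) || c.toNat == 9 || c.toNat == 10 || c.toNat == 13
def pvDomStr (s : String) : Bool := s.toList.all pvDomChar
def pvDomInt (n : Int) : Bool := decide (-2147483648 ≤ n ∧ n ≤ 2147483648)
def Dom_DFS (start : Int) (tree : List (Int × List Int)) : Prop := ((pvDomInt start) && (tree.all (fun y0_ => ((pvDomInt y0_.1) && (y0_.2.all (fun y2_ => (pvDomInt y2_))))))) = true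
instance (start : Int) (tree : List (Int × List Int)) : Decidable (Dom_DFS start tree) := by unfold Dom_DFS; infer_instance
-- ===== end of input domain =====

set_option maxRecDepth 8192

-- B replaces A's explicit (node,length) stack over a 100001-slot boolean array by a
-- recursive DFS with a visited set (objective: alternative decomposition, not faster).

-- ===== PORT A =====

-- tree[p] (dict lookup, first match); total via getD [] — Python raises KeyError on a
-- missing key, excluded by Pre_DFS.
def pvNbrs (tree : List (Int × List Int)) (p : Int) : List Int :=
  (PySem.Dict.get? ⟨tree⟩ p).getD []

-- visited[n] read: Python list indexing incl. negative wraparound (pyGetD); exact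
-- wherever Python does not raise; outside the index range Python raises IndexError
-- (excluded by Pre_DFS) and we return true, which also keeps the loop terminating.
def visGet (vis : List Bool) (n : Int) : Bool :=
  if -(PySem.List.len vis) ≤ n ∧ n < PySem.List.len vis then PySem.List.pyGetD vis n false
  else true

-- visited[n] = True; exact wherever Python does not raise; no-op outside (see visGet).
def visSet (vis : List Bool) (n : Int) : List Bool :=
  if -(PySem.List.len vis) ≤ n ∧ n < PySem.List.len vis then PySem.List.pySetD vis n true
  else vis

-- A's inner 'for i in tree[p]' loop: state (stack, visited, count).
def innerA (l : Int) : List Int → List (Int × Int) → List Bool → Nat → List (Int × Int) × List Bool × Nat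
  | [], stack, vis, count => (stack, vis, count)
  | i :: is, stack, vis, count =>
    if visGet vis i then innerA l is stack vis count
    else innerA l is (stack ++ [(i, l + 1)]) (visSet vis i) (count + 1)

-- support the loop's termination proof cites: the Python index a valid visited[n] denotes
def pvIdx (len : Nat) (i : Int) : Nat := if 0 ≤ i then i.toNat else len - (-i).toNat

theorem pvIdx_lt (len : Nat) (i : Int) (h : -(len : Int) ≤ i ∧ i < len) : pvIdx len i < len := by
  unfold pvIdx; split <;> omega

theorem pyIdx?_eq (len : Nat) (i : Int) (h : -(len : Int) ≤ i ∧ i < len) :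
    PySem.List.pyIdx? len i = some (pvIdx len i) := by
  unfold PySem.List.pyIdx? pvIdx
  split <;> split <;> first | rfl | omega

theorem visGet_eq (vis : List Bool) (i : Int) (h : -(vis.length : Int) ≤ i ∧ i < vis.length) :
    visGet vis i = vis[pvIdx vis.length i]'(pvIdx_lt _ _ h) := by
  unfold visGet
  rw [if_pos (by rw [PySem.List.len_eq]; exact h)]
  unfold PySem.List.pyGetD PySem.List.pyGet?
  rw [pyIdx?_eq _ _ h]
  simp [List.getElem?_eq_getElem (pvIdx_lt _ _ h)]

theorem visSet_eq (vis : List Bool) (i : Int) (h : -(vis.length : Int) ≤ i ∧ i < vis.length) :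
    visSet vis i = vis.set (pvIdx vis.length i) true := by
  unfold visSet
  rw [if_pos (by rw [PySem.List.len_eq]; exact h)]
  unfold PySem.List.pySetD PySem.List.pySet?
  rw [pyIdx?_eq _ _ h]
  rfl

theorem count_false_set_true_le (l : List Bool) (n : Nat) :
    (l.set n true).count false ≤ l.count false := by
  induction l generalizing n with
  | nil => simp
  | cons b bs ih =>
    cases n with
    | zero => cases b <;> simp
    | succ m => cases b <;> simpa [List.count_cons] using ih m

theorem count_false_set_true_succ (l : List Bool) (n : Nat) (h : n < l.length)
    (hf : l[n] = false) : (l.set n true).count false + 1 = l.count false := by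
  induction l generalizing n with
  | nil => simp at h
  | cons b bs ih =>
    cases n with
    | zero => simp_all
    | succ m =>
      simp only [List.length_cons, Nat.succ_lt_succ_iff] at h
      simp only [List.getElem_cons_succ] at hf
      have := ih m h hf
      cases b <;> simp <;> omega

theorem cf_visSet_le (vis : List Bool) (i : Int) :
    (visSet vis i).count false ≤ vis.count false := by
  by_cases h : -(vis.length : Int) ≤ i ∧ i < vis.length
  · rw [visSet_eq vis i h]
    exact count_false_set_true_le vis (pvIdx vis.length i)
  · unfold visSet
    rw [if_neg (by rw [PySem.List.len_eq]; exact h)]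

theorem cf_visSet_succ (vis : List Bool) (i : Int) (h : visGet vis i = false) :
    (visSet vis i).count false + 1 = vis.count false := by
  by_cases hr : -(vis.length : Int) ≤ i ∧ i < vis.length
  · rw [visGet_eq vis i hr] at h
    rw [visSet_eq vis i hr]
    exact count_false_set_true_succ vis (pvIdx vis.length i) (pvIdx_lt _ _ hr) h
  · unfold visGet at h
    rw [if_neg (by rw [PySem.List.len_eq]; exact hr)] at h
    exact absurd h (by simp)

theorem cf_visSet_lt (vis : List Bool) (i : Int) (h : visGet vis i = false) :
    (visSet vis i).count false < vis.count false := by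
  have := cf_visSet_succ vis i h
  omega

theorem innerA_cf_le (l : Int) (ns : List Int) :
    ∀ stack vis count, ((innerA l ns stack vis count).2.1).count false ≤ vis.count false := by
  induction ns with
  | nil => intro stack vis count; simp [innerA]
  | cons i is ih =>
    intro stack vis count
    by_cases hv : visGet vis i = true
    · rw [innerA, if_pos hv]; exact ih _ _ _
    · rw [innerA, if_neg hv]; exact le_trans (ih _ _ _) (cf_visSet_le vis i)

theorem innerA_count_eq (l : Int) (ns : List Int) :
    ∀ stack vis count, (innerA l ns stack vis count).2.2 = count →
      innerA l ns stack vis count = (stack, vis, count) := by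
  induction ns with
  | nil => intro stack vis count _; simp [innerA]
  | cons i is ih =>
    intro stack vis count h
    by_cases hv : visGet vis i = true
    · rw [innerA, if_pos hv] at h ⊢; exact ih _ _ _ h
    · rw [innerA, if_neg hv] at h
      exfalso
      -- count never decreases along the recursion
      have mono : ∀ ms st v c, c ≤ (innerA l ms st v c).2.2 := by
        intro ms
        induction ms with
        | nil => intro st v c; simp [innerA]
        | cons j js ihj =>
          intro st v c
          by_cases hw : visGet v j = true
          · rw [innerA, if_pos hw]; exact ihj _ _ _
          · rw [innerA, if_neg hw]; exact le_trans (Nat.le_succ c) (ihj _ _ _)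
      have := mono is (stack ++ [(i, l + 1)]) (visSet vis i) (count + 1)
      omega

theorem innerA_count_ne (l : Int) (ns : List Int) :
    ∀ stack vis count, (innerA l ns stack vis count).2.2 ≠ count →
      ((innerA l ns stack vis count).2.1).count false < vis.count false := by
  induction ns with
  | nil => intro stack vis count h; simp [innerA] at h
  | cons i is ih =>
    intro stack vis count h
    by_cases hv : visGet vis i = true
    · rw [innerA, if_pos hv] at h ⊢; exact ih _ _ _ h
    · rw [innerA, if_neg hv]
      have hv' : visGet vis i = false := by simpa using hv
      exact lt_of_le_of_lt (innerA_cf_le l is _ _ _) (cf_visSet_lt vis i hv')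

-- A's while-loop: pop the last element, expand, recurse; terminates because marking
-- shrinks the number of unmarked slots and an expansion-free step shrinks the stack.
def loopA (tree : List (Int × List Int)) (stack : List (Int × Int)) (vis : List Bool) (ans : Int) : Int :=
  match hs : stack.getLast? with
  | none => ans
  | some pl =>
    let r := innerA pl.2 (pvNbrs tree pl.1) stack.dropLast vis 0
    loopA tree r.1 r.2.1 (if r.2.2 = 0 then max ans pl.2 else ans)
termination_by (vis.count false, stack.length)
decreasing_by
  rcases eq_or_ne (innerA pl.2 (pvNbrs tree pl.1) stack.dropLast vis 0).2.2 0 with h0 | h0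
  · have he := innerA_count_eq pl.2 (pvNbrs tree pl.1) stack.dropLast vis 0 h0
    have hne : stack ≠ [] := by
      intro hnil; rw [hnil] at hs; simp at hs
    have hlen : stack.dropLast.length < stack.length := by
      rw [List.length_dropLast]
      have := List.length_pos_iff.mpr hne
      omega
    rw [he]
    exact Prod.Lex.right _ hlen
  · exact Prod.Lex.left _ _ (innerA_count_ne pl.2 (pvNbrs tree pl.1) stack.dropLast vis 0 h0)

def DFS (start : Int) (tree : List (Int × List Int)) : Int :=
  loopA tree [(start, 0)] (visSet (List.replicate 100001 false) start) 0

-- ===== PORT B =====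

-- B's inner 'for c in tree[p]' loop: collect and mark the freshly discovered children.
def innerB : List Int → PySem.Set Int → List Int × PySem.Set Int
  | [], s => ([], s)
  | c :: cs, s =>
    if PySem.Set.contains s c then innerB cs s
    else
      let r := innerB cs (PySem.Set.add s c)
      (c :: r.1, r.2)

-- B's recursive dfs helper and its 'for c in reversed(fresh)' loop. The fuel argument
-- only totalises the recursion: calls nest one newly marked node per level, so the
-- 100002 supplied by DFS_alt is never exhausted on inputs satisfying Pre_DFS.
mutual
def dfsB (tree : List (Int × List Int)) : Nat → Int → Int → PySem.Set Int → Int → PySem.Set Int × Int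
  | 0, _, _, s, best => (s, best)
  | fuel + 1, p, l, s, best =>
    let r := innerB (pvNbrs tree p) s
    let best1 := if r.1 = [] then max best l else best
    dfsListB tree fuel r.1.reverse (l + 1) r.2 best1
termination_by fuel _ _ _ _ => (fuel, 0, 0)

def dfsListB (tree : List (Int × List Int)) : Nat → List Int → Int → PySem.Set Int → Int → PySem.Set Int × Int
  | _, [], _, s, best => (s, best)
  | fuel, c :: cs, l, s, best =>
    let r := dfsB tree fuel c l s best
    dfsListB tree fuel cs l r.1 r.2
termination_by fuel cs _ _ _ => (fuel, 1, cs.length)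
end

def DFS_alt (start : Int) (tree : List (Int × List Int)) : Int :=
  (dfsB tree 100002 start 0 (PySem.Set.add PySem.Set.empty start) 0).2

-- the set of node ids reachable from start by generic saturation of the adjacency
-- relation (iterated enough times to stabilise); used only to state Pre_DFS — A never
-- examines entries outside it
def pvStep (tree : List (Int × List Int)) (R : PySem.Set Int) : PySem.Set Int :=
  PySem.Set.update R (R.flatMap (pvNbrs tree))

def pvReach (start : Int) (tree : List (Int × List Int)) : PySem.Set Int :=
  (pvStep tree)^[(start :: tree.flatMap (fun p => p.2)).length]
    (PySem.Set.add PySem.Set.empty start)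

-- ===== PRECONDITION & SPEC =====
-- Pre_DFS excludes the inputs on which Python A raises — KeyError when the traversal
-- pops a node that is not a key of tree, IndexError when a traversed node id falls
-- outside [-100001, 100000] — stated over the reachable set R only (A never examines
-- unreachable entries); and it excludes inputs whose reachable node ids collide modulo
-- 100001 (e.g. -1 vs 100000), where A returns a value but its fixed-size visited buffer
-- aliases two distinct nodes via negative-index wraparound.
def Pre_DFS (start : Int) (tree : List (Int × List Int)) : Prop :=
  start ∈ pvReach start tree ∧
  (∀ p ∈ pvReach start tree, ∀ n ∈ pvNbrs tree p, n ∈ pvReach start tree) ∧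
  (∀ n ∈ pvReach start tree,
    -100001 ≤ n ∧ n ≤ 100000 ∧ (PySem.Dict.get? ⟨tree⟩ n).isSome = true) ∧
  (∀ a ∈ pvReach start tree, ∀ b ∈ pvReach start tree,
    a % 100001 = b % 100001 → a = b)

instance (start : Int) (tree : List (Int × List Int)) : Decidable (Pre_DFS start tree) := by
  unfold Pre_DFS; infer_instance

def pvWitness_DFS : Int × (List (Int × List Int)) := (0, [(0, [1]), (1, [])])

def Spec_DFS (start : Int) (tree : List (Int × List Int)) (out : Int) : Prop := out = DFS_alt start tree
instance (start : Int) (tree : List (Int × List Int)) (out : Int) : Decidable (Spec_DFS start tree out) := by unfold Spec_DFS; infer_instance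

-- ===== CLAIM (what is proved, stated in full; the proofs are below) =====
def Claim_equal_DFS : Prop := ∀ (start : Int) (tree : List (Int × List Int)), Dom_DFS start tree → Pre_DFS start tree → Spec_DFS start tree (DFS start tree)

-- ===== LEMMAS AND PROOFS =====

-- the marking relation between A's boolean array and B's visited set, relative to the
-- collision-free universe dom of node ids
def InvVS (dom : List Int) (vis : List Bool) (s : PySem.Set Int) : Prop :=
  vis.length = 100001 ∧ (∀ x ∈ s, x ∈ dom) ∧
  ∀ n ∈ dom, (visGet vis n = true ↔ n ∈ s)

theorem pvIdx_eq_emod (n : Int) (h : -100001 ≤ n ∧ n < 100001) :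
    pvIdx 100001 n = (n % 100001).toNat := by
  unfold pvIdx; split <;> omega

theorem length_visSet (vis : List Bool) (i : Int) : (visSet vis i).length = vis.length := by
  by_cases h : -(vis.length : Int) ≤ i ∧ i < vis.length
  · rw [visSet_eq vis i h]; simp
  · unfold visSet
    rw [if_neg (by rw [PySem.List.len_eq]; exact h)]

theorem visGet_visSet_self (vis : List Bool) (i : Int) : visGet (visSet vis i) i = true := by
  by_cases h : -(vis.length : Int) ≤ i ∧ i < vis.length
  · have hlen : (visSet vis i).length = vis.length := length_visSet vis i
    rw [visGet_eq (visSet vis i) i (by rw [hlen]; exact h)]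
    have : visSet vis i = vis.set (pvIdx vis.length i) true := visSet_eq vis i h
    simp only [this]
    simp [List.getElem_set_self]
  · have hvs : visSet vis i = vis := by
      unfold visSet
      rw [if_neg (by rw [PySem.List.len_eq]; exact h)]
    rw [hvs]
    unfold visGet
    rw [if_neg (by rw [PySem.List.len_eq]; exact h)]

theorem visGet_visSet_of_idx_ne (vis : List Bool) (i n : Int)
    (hid : pvIdx vis.length n ≠ pvIdx vis.length i) :
    visGet (visSet vis i) n = visGet vis n := by
  by_cases hi : -(vis.length : Int) ≤ i ∧ i < vis.length
  · have hlen : (visSet vis i).length = vis.length := length_visSet vis i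
    have hset : visSet vis i = vis.set (pvIdx vis.length i) true := visSet_eq vis i hi
    by_cases hn : -(vis.length : Int) ≤ n ∧ n < vis.length
    · rw [visGet_eq vis n hn, visGet_eq (visSet vis i) n (by rw [hlen]; exact hn)]
      simp only [hset, List.length_set]
      rw [List.getElem_set_ne (Ne.symm hid)]
    · unfold visGet
      rw [if_neg (by rw [PySem.List.len_eq, hlen]; exact hn),
          if_neg (by rw [PySem.List.len_eq]; exact hn)]
  · unfold visSet
    rw [if_neg (by rw [PySem.List.len_eq]; exact hi)]

theorem loopA_nil (tree : List (Int × List Int)) (vis : List Bool) (ans : Int) :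
    loopA tree [] vis ans = ans := by
  rw [loopA]
  split
  · rfl
  · next pl hs => simp at hs

theorem loopA_concat (tree : List (Int × List Int)) (Y : List (Int × Int)) (c l : Int)
    (vis : List Bool) (ans : Int) :
    loopA tree (Y ++ [(c, l)]) vis ans =
      loopA tree (innerA l (pvNbrs tree c) Y vis 0).1 (innerA l (pvNbrs tree c) Y vis 0).2.1
        (if (innerA l (pvNbrs tree c) Y vis 0).2.2 = 0 then max ans l else ans) := by
  rw [loopA]
  split
  · next hs => simp at hs
  · next pl hs =>
    rw [List.getLast?_concat] at hs
    cases hs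
    simp

-- the fused inner-loop characterisation: A's expansion and B's fresh-collection agree
theorem innerAB (dom : List Int) (HD : ∀ n ∈ dom, -100001 ≤ n ∧ n ≤ 100000)
    (HI : ∀ a ∈ dom, ∀ b ∈ dom, a % 100001 = b % 100001 → a = b)
    (l : Int) (ns : List Int) :
    ∀ (vis : List Bool) (s : PySem.Set Int),
      InvVS dom vis s → (∀ n ∈ ns, n ∈ dom) →
      ∃ fresh vis' s',
        (∀ stack0 count0, innerA l ns stack0 vis count0 =
          (stack0 ++ fresh.map (fun c => (c, l + 1)), vis', count0 + fresh.length)) ∧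
        innerB ns s = (fresh, s') ∧
        InvVS dom vis' s' ∧
        vis'.count false + fresh.length = vis.count false ∧
        (∀ x : Int, x ∈ s → x ∈ s') ∧
        (∀ c ∈ fresh, c ∈ dom ∧ c ∈ s') ∧
        (fresh = [] → vis' = vis ∧ s' = s) := by
  induction ns with
  | nil =>
    intro vis s hInv _
    exact ⟨[], vis, s, fun stack0 count0 => by simp [innerA], by simp [innerB],
      hInv, by simp, fun x h => h, by simp, fun _ => ⟨rfl, rfl⟩⟩
  | cons i is ih =>
    intro vis s hInv hdom
    have hi : i ∈ dom := hdom i (List.mem_cons_self)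
    have hmemiff := hInv.2.2 i hi
    by_cases hmem : i ∈ s
    · have hvg : visGet vis i = true := hmemiff.mpr hmem
      have hcont : PySem.Set.contains s i = true := by
        simp [PySem.Set.contains]; exact hmem
      obtain ⟨fresh, vis', s', hA, hB, hI, hcf, hmono, hfr, hnil⟩ :=
        ih vis s hInv (fun n hn => hdom n (List.mem_cons_of_mem _ hn))
      refine ⟨fresh, vis', s', ?_, ?_, hI, hcf, hmono, hfr, hnil⟩
      · intro stack0 count0; rw [innerA, if_pos hvg]; exact hA stack0 count0
      · rw [innerB, if_pos hcont]; exact hB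
    · have hvg : visGet vis i = false := by
        cases hv : visGet vis i
        · rfl
        · exact absurd (hmemiff.mp hv) hmem
      have hcont : PySem.Set.contains s i = false := by
        simp [PySem.Set.contains]; exact hmem
      have hInv1 : InvVS dom (visSet vis i) (PySem.Set.add s i) := by
        refine ⟨by rw [length_visSet]; exact hInv.1, ?_, fun n hn => ?_⟩
        · intro x hx
          rcases (PySem.Set.mem_add s i x).mp hx with hx' | rfl
          · exact hInv.2.1 x hx'
          · exact hi
        · by_cases hni : n = i
          · subst hni
            simp [visGet_visSet_self, PySem.Set.mem_add]
          · have hid : pvIdx vis.length n ≠ pvIdx vis.length i := by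
              intro hEq
              have hrn := HD n hn
              have hri := HD i hi
              rw [hInv.1] at hEq
              rw [pvIdx_eq_emod n (by omega), pvIdx_eq_emod i (by omega)] at hEq
              have : n % 100001 = i % 100001 := by omega
              exact hni (HI n hn i hi this)
            rw [visGet_visSet_of_idx_ne vis i n hid, PySem.Set.mem_add]
            simp [hni, hInv.2.2 n hn]
      obtain ⟨fresh, vis', s', hA, hB, hI, hcf, hmono, hfr, hnil⟩ :=
        ih (visSet vis i) (PySem.Set.add s i) hInv1
          (fun n hn => hdom n (List.mem_cons_of_mem _ hn))
      have hiadd : i ∈ PySem.Set.add s i := by rw [PySem.Set.mem_add]; right; rfl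
      refine ⟨i :: fresh, vis', s', ?_, ?_, hI, ?_, ?_, ?_, ?_⟩
      · intro stack0 count0
        rw [innerA, if_neg (ne_true_of_eq_false hvg), hA]
        simp [List.append_assoc]
        omega
      · rw [innerB, if_neg (ne_true_of_eq_false hcont), hB]
      · have := cf_visSet_succ vis i hvg
        simp only [List.length_cons]
        omega
      · intro x hx
        exact hmono x (by rw [PySem.Set.mem_add]; left; exact hx)
      · intro c hc
        rcases List.mem_cons.mp hc with hceq | hc'
        · subst hceq
          exact ⟨hi, hmono c hiadd⟩
        · exact hfr c hc'
      · intro h; cases h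

-- the main correspondence: A's stack loop over pending children equals B's recursive
-- descent over the same children in discovery order
theorem mainDFS (tree : List (Int × List Int)) (dom : List Int)
    (HC : ∀ p ∈ dom, ∀ n ∈ pvNbrs tree p, n ∈ dom)
    (HD : ∀ n ∈ dom, -100001 ≤ n ∧ n ≤ 100000)
    (HI : ∀ a ∈ dom, ∀ b ∈ dom, a % 100001 = b % 100001 → a = b) :
    ∀ (U : Nat) (cs : List Int) (vis : List Bool) (s : PySem.Set Int) (l ans : Int) (fuel : Nat),
      InvVS dom vis s → vis.count false ≤ U → U + 1 ≤ fuel →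
      (∀ c ∈ cs, c ∈ s) →
      ∃ vis' s' b',
        InvVS dom vis' s' ∧ vis'.count false ≤ vis.count false ∧
        (∀ x : Int, x ∈ s → x ∈ s') ∧
        dfsListB tree fuel cs l s ans = (s', b') ∧
        ∀ rest, loopA tree (rest ++ cs.reverse.map (fun c => (c, l))) vis ans =
          loopA tree rest vis' b' := by
  intro U
  induction U using Nat.strong_induction_on with
  | _ U IHU =>
  intro cs
  induction cs with
  | nil =>
    intro vis s l ans fuel hInv hcf hfuel _
    exact ⟨vis, s, ans, hInv, le_rfl, fun x h => h, by rw [dfsListB], fun rest => by simp⟩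
  | cons c cs' IHcs =>
    intro vis s l ans fuel hInv hcf hfuel hcs
    have hns : ∀ n ∈ pvNbrs tree c, n ∈ dom :=
      HC c (hInv.2.1 c (hcs c List.mem_cons_self))
    obtain ⟨fresh, vis1, s1, hA, hB, hInv1, hcfEq, hmono1, hfresh, hnilc⟩ :=
      innerAB dom HD HI l (pvNbrs tree c) vis s hInv hns
    obtain ⟨fuel2, rfl⟩ : ∃ k, fuel = k + 1 := ⟨fuel - 1, by omega⟩
    have hstep2 : ∃ vis2 s2 b2,
        InvVS dom vis2 s2 ∧ vis2.count false ≤ vis1.count false ∧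
        (∀ x : Int, x ∈ s1 → x ∈ s2) ∧
        dfsListB tree fuel2 fresh.reverse (l + 1) s1
          (if fresh = [] then max ans l else ans) = (s2, b2) ∧
        ∀ rest0, loopA tree (rest0 ++ fresh.map (fun x => (x, l + 1))) vis1
          (if fresh = [] then max ans l else ans) = loopA tree rest0 vis2 b2 := by
      rcases List.eq_nil_or_concat' fresh with hfe | ⟨ys, y, hfe⟩
      · subst hfe
        refine ⟨vis1, s1, max ans l, hInv1, le_rfl, fun x h => h, ?_,
          fun rest0 => by simp only [List.map_nil, List.append_nil, reduceIte]⟩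
        simp only [List.reverse_nil]
        rw [dfsListB]
        simp only [reduceIte]
      · have hfne : fresh ≠ [] := by rw [hfe]; simp
        have hflen : 0 < fresh.length := List.length_pos_iff.mpr hfne
        have hcflt : vis1.count false < U := by omega
        obtain ⟨vis2, s2, b2, hI2, hle2, hm2, hBeq2, hL2⟩ :=
          IHU (vis1.count false) hcflt fresh.reverse vis1 s1 (l + 1)
            (if fresh = [] then max ans l else ans) fuel2 hInv1 le_rfl (by omega)
            (fun x hx => (hfresh x (List.mem_reverse.mp hx)).2)
        refine ⟨vis2, s2, b2, hI2, hle2, hm2, hBeq2, fun rest0 => ?_⟩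
        have := hL2 rest0
        rwa [List.reverse_reverse] at this
    obtain ⟨vis2, s2, b2, hInv2, hle2, hmono2, hBeq2, hLoop2⟩ := hstep2
    obtain ⟨vis3, s3, b3, hInv3, hle3, hmono3, hBeq3, hLoop3⟩ :=
      IHcs vis2 s2 l b2 (fuel2 + 1) hInv2 (by omega) hfuel
        (fun x hx => hmono2 x (hmono1 x (hcs x (List.mem_cons_of_mem _ hx))))
    refine ⟨vis3, s3, b3, hInv3, by omega, fun x hx => hmono3 x (hmono2 x (hmono1 x hx)), ?_, ?_⟩
    · have hdfsB : dfsB tree (fuel2 + 1) c l s ans = (s2, b2) := by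
        rw [dfsB]
        simp only [hB]
        exact hBeq2
      rw [dfsListB]
      simp only [hdfsB]
      exact hBeq3
    · intro rest
      have hsplit : (c :: cs').reverse.map (fun x => (x, l)) =
          cs'.reverse.map (fun x => (x, l)) ++ [(c, l)] := by simp
      rw [hsplit, ← List.append_assoc, loopA_concat]
      rw [hA (rest ++ cs'.reverse.map (fun x => (x, l))) 0]
      have : (if 0 + fresh.length = 0 then max ans l else ans) =
          (if fresh = [] then max ans l else ans) := by
        by_cases hfe : fresh = [] <;> simp [hfe, List.length_eq_zero_iff]
      simp only [this]
      rw [hLoop2 (rest ++ cs'.reverse.map (fun x => (x, l)))]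
      exact hLoop3 rest

-- ===== VERDICT (by name: the statement is the Claim_ definition above) =====
theorem DFS_spec : Claim_equal_DFS := by
  intro start tree _ hpre
  unfold Spec_DFS DFS DFS_alt
  obtain ⟨hstart, HC, hgood, HI⟩ := hpre
  have HD : ∀ n ∈ pvReach start tree, -100001 ≤ n ∧ n ≤ 100000 := by
    intro n hn
    exact ⟨(hgood n hn).1, (hgood n hn).2.1⟩
  have hs0 : PySem.Set.add PySem.Set.empty start = [start] := rfl
  have hlen0 : (visSet (List.replicate 100001 false) start).length = 100001 := by
    rw [length_visSet, List.length_replicate]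
  have hrepl : (List.replicate 100001 false).length = 100001 := List.length_replicate
  have hInv0 : InvVS (pvReach start tree)
      (visSet (List.replicate 100001 false) start)
      (PySem.Set.add PySem.Set.empty start) := by
    refine ⟨hlen0, ?_, fun n hn => ?_⟩
    · intro x hx
      rw [hs0] at hx
      rcases List.mem_singleton.mp hx with rfl
      exact hstart
    · rw [hs0]
      by_cases hneq : n = start
      · subst hneq
        rw [visGet_visSet_self]
        simp
      · have hrn := HD n hn
        have hrs := HD start hstart
        have hid : pvIdx (List.replicate 100001 false).length n ≠
            pvIdx (List.replicate 100001 false).length start := by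
          intro hEq
          rw [hrepl, pvIdx_eq_emod n (by omega), pvIdx_eq_emod start (by omega)] at hEq
          exact hneq (HI n hn start hstart (by omega))
        rw [visGet_visSet_of_idx_ne _ _ _ hid]
        have hfalse : visGet (List.replicate 100001 false) n = false := by
          rw [visGet_eq (List.replicate 100001 false) n (by rw [hrepl]; constructor <;> omega)]
          exact List.getElem_replicate _
        rw [hfalse]
        simp [hneq]
  obtain ⟨vis', s', b', _, _, _, hBeq, hLoop⟩ :=
    mainDFS tree (pvReach start tree) HC HD HI
      ((visSet (List.replicate 100001 false) start).count false) [start]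
      (visSet (List.replicate 100001 false) start) (PySem.Set.add PySem.Set.empty start)
      0 0 100002 hInv0 le_rfl
      (by
        have h := List.count_le_length (a := false) (l := visSet (List.replicate 100001 false) start)
        rw [hlen0] at h
        omega)
      (fun x hx => by
        rcases List.mem_singleton.mp hx with rfl
        rw [hs0]
        exact List.mem_singleton.mpr rfl)
  have hListB : dfsListB tree 100002 [start] 0 (PySem.Set.add PySem.Set.empty start) 0 =
      dfsB tree 100002 start 0 (PySem.Set.add PySem.Set.empty start) 0 := by
    rw [dfsListB, dfsListB]
  have hfinal := hLoop []
  simp only [List.nil_append, List.reverse_singleton, List.map] at hfinal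
  rw [loopA_nil] at hfinal
  rw [hfinal, hListB.symm, hBeq]
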